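-- pv_equiv track=rewrite | github.com/dochobbs/syrinx | core/validator.py | categorize_targets
-- ===== SOURCE A (Python) =====
-- from typing import Dict, List, Any, Optional
--
-- def categorize_targets(targets: List[str]) -> Dict[str, List[str]]:
--     """Categorize targets into domains for reporting."""
--     categories = {
--         "clinical_skills": [],
--         "communication": [],
--         "documentation": [],
--         "age_specific": [],
--         "content_specific": [],
--         "error_detection": []
--     }
--
--     clinical = ["history_of_present_illness", "differential_diagnosis", "treatment_plan",
--                 "antibiotic_stewardship", "pain_management", "disposition_decision",
--                 "diagnostic_workup", "referral_coordination", "growth_assessment",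
--                 "developmental_screening", "feeding_assessment", "immunization_review"]
--
--     communication = ["anticipatory_guidance", "parent_education", "shared_decision_making",
--                      "therapeutic_rapport", "multi_caregiver_communication", "vaccine_hesitancy",
--                      "adolescent_confidentiality"]
--
--     documentation = ["documentation_completeness", "interval_history", "care_plan_adjustment"]
--
--     age_specific = ["neonatal_red_flags", "young_infant_fever_protocol", "infant_developmental_screening",
--                     "toddler_safety_counseling", "preschool_readiness", "school_age_wellness",
--                     "risk_behavior_screening"]
--
--     for target in targets:
--         if target.startswith("detect_"):
--             categories["error_detection"].append(target)
--         elif target in clinical: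
--             categories["clinical_skills"].append(target)
--         elif target in communication:
--             categories["communication"].append(target)
--         elif target in documentation:
--             categories["documentation"].append(target)
--         elif target in age_specific:
--             categories["age_specific"].append(target)
--         else:
--             categories["content_specific"].append(target)
--
--     # Remove empty categories
--     return {k: v for k, v in categories.items() if v}
-- ===== SOURCE B (Python) =====
-- from typing import Dict, List
--
-- _KEYS = ["clinical_skills", "communication", "documentation",
--          "age_specific", "content_specific", "error_detection"]
--
-- _INDEX = {}
-- for _cat, _names in [
--     ("clinical_skills",
--      ["history_of_present_illness", "differential_diagnosis", "treatment_plan",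
--       "antibiotic_stewardship", "pain_management", "disposition_decision",
--       "diagnostic_workup", "referral_coordination", "growth_assessment",
--       "developmental_screening", "feeding_assessment", "immunization_review"]),
--     ("communication",
--      ["anticipatory_guidance", "parent_education", "shared_decision_making",
--       "therapeutic_rapport", "multi_caregiver_communication", "vaccine_hesitancy",
--       "adolescent_confidentiality"]),
--     ("documentation",
--      ["documentation_completeness", "interval_history", "care_plan_adjustment"]),
--     ("age_specific",
--      ["neonatal_red_flags", "young_infant_fever_protocol", "infant_developmental_screening",
--       "toddler_safety_counseling", "preschool_readiness", "school_age_wellness",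
--       "risk_behavior_screening"]),
-- ]:
--     for _n in _names:
--         _INDEX[_n] = _cat
--
--
-- def _classify(target: str) -> str:
--     if target.startswith("detect_"):
--         return "error_detection"
--     return _INDEX.get(target, "content_specific")
--
--
-- def categorize_targets(targets: List[str]) -> Dict[str, List[str]]:
--     """Categorize targets into domains for reporting."""
--     result = {}
--     for key in _KEYS:
--         bucket = [t for t in targets if _classify(t) == key]
--         if bucket:
--             result[key] = bucket
--     return result
-- ===== Notes on version B (the rewrite author's own statement) =====
-- stated objective: alternative
-- what changed: Replaced A's single pass (seeded six-key dict, five-way elif membership cascade appending each target, final empty-category filter) with staged per-category passes: a module-level reverse index and classifier, then for each of the six keys in order one filter pass over the targets, adding the bucket only if non-empty.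
import Mathlib
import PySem

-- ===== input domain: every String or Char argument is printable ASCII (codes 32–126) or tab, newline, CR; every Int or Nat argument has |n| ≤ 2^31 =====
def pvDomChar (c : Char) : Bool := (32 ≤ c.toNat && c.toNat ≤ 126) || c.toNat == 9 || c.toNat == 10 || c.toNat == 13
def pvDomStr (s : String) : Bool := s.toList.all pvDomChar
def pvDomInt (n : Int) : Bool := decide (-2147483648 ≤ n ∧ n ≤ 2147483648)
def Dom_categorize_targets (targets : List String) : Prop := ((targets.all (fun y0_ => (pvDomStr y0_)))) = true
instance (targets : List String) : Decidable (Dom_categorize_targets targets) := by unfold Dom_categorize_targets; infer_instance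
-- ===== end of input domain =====

-- B replaces A's single pass (seeded dict, five-way elif cascade appending per target, final
-- empty-filter) by staged per-category passes: one filter of the targets per category key.

-- ===== PORT A =====
-- the four constant category lists of A
def pvClinical : List String :=
  ["history_of_present_illness", "differential_diagnosis", "treatment_plan",
   "antibiotic_stewardship", "pain_management", "disposition_decision",
   "diagnostic_workup", "referral_coordination", "growth_assessment",
   "developmental_screening", "feeding_assessment", "immunization_review"]

def pvCommunication : List String :=
  ["anticipatory_guidance", "parent_education", "shared_decision_making",
   "therapeutic_rapport", "multi_caregiver_communication", "vaccine_hesitancy",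
   "adolescent_confidentiality"]

def pvDocumentation : List String :=
  ["documentation_completeness", "interval_history", "care_plan_adjustment"]

def pvAgeSpecific : List String :=
  ["neonatal_red_flags", "young_infant_fever_protocol", "infant_developmental_screening",
   "toddler_safety_counseling", "preschool_readiness", "school_age_wellness",
   "risk_behavior_screening"]

-- seeded categories dict of A
def pvCategories0 : PySem.Dict String (List String) :=
  PySem.Dict.mk [("clinical_skills", []), ("communication", []), ("documentation", []),
                 ("age_specific", []), ("content_specific", []), ("error_detection", [])]

-- categories[k].append(target) ported as modify with default [] (the six keys are always present)
def categorize_targets (targets : List String) : List (String × List String) :=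
  let categories :=
    targets.foldl (fun d target =>
      if PySem.Str.startswith target "detect_" then
        d.modify "error_detection" [] (· ++ [target])
      else if pvClinical.contains target then
        d.modify "clinical_skills" [] (· ++ [target])
      else if pvCommunication.contains target then
        d.modify "communication" [] (· ++ [target])
      else if pvDocumentation.contains target then
        d.modify "documentation" [] (· ++ [target])
      else if pvAgeSpecific.contains target then
        d.modify "age_specific" [] (· ++ [target])
      else
        d.modify "content_specific" [] (· ++ [target])) pvCategories0
  categories.items.filter (fun kv => !kv.2.isEmpty)

-- ===== PORT B =====
-- module-level reverse index of Source B: known target string -> category key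
def pvIndex : PySem.Dict String String :=
  ([("clinical_skills", pvClinical), ("communication", pvCommunication),
    ("documentation", pvDocumentation), ("age_specific", pvAgeSpecific)]).foldl
    (fun d catNames => catNames.2.foldl (fun d n => d.insert n catNames.1) d) PySem.Dict.empty

-- Source B's _KEYS
def pvKeys : List String :=
  ["clinical_skills", "communication", "documentation",
   "age_specific", "content_specific", "error_detection"]

-- Source B's _classify
def pvClassify (target : String) : String :=
  if PySem.Str.startswith target "detect_" then "error_detection"
  else pvIndex.getD target "content_specific"

-- result dict built key by key; one filter pass of targets per category
def categorize_targets_alt (targets : List String) : List (String × List String) :=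
  pvKeys.foldl (fun result key =>
    let bucket := targets.filter (fun t => pvClassify t == key)
    if bucket.isEmpty then result else result ++ [(key, bucket)]) []

-- ===== PRECONDITION & SPEC =====
def Spec_categorize_targets (targets : List String) (out : List (String × List String)) : Prop := out = categorize_targets_alt targets
instance (targets : List String) (out : List (String × List String)) : Decidable (Spec_categorize_targets targets out) := by unfold Spec_categorize_targets; infer_instance

-- ===== CLAIM (what is proved, stated in full; the proofs are below) =====
def Claim_equal_categorize_targets : Prop := ∀ (targets : List String), Dom_categorize_targets targets → Spec_categorize_targets targets (categorize_targets targets)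

-- ===== LEMMAS AND PROOFS =====

-- the six-key categories dict as a function of its six buckets (proof helper)
def pvD (v1 v2 v3 v4 v5 v6 : List String) : PySem.Dict String (List String) :=
  PySem.Dict.mk [("clinical_skills", v1), ("communication", v2), ("documentation", v3),
                 ("age_specific", v4), ("content_specific", v5), ("error_detection", v6)]

-- getD on an assoc list whose prefix maps every key of ks to v
lemma getD_map_append (ks : List String) (v d : String) (rest : List (String × String)) (t : String) :
    (PySem.Dict.mk (ks.map (fun k => (k, v)) ++ rest)).getD t d
      = if ks.contains t then v else (PySem.Dict.mk rest).getD t d := by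
  induction ks with
  | nil => simp
  | cons k ks ih =>
    simp only [List.map_cons, List.cons_append, List.contains_cons,
      PySem.Dict.getD, PySem.Dict.get?_mk_cons]
    by_cases h : k = t
    · simp [h]
    · have h' : (t == k) = false := by simp [Ne.symm h]
      have h'' : (k == t) = false := by simp [h]
      simp only [h', h'', Bool.false_or] at *
      simpa [PySem.Dict.getD] using ih

-- the reverse index looks up exactly A's membership cascade
set_option maxRecDepth 8192 in
lemma pvIndex_getD (t : String) :
    pvIndex.getD t "content_specific"
      = if pvClinical.contains t then "clinical_skills"
        else if pvCommunication.contains t then "communication"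
        else if pvDocumentation.contains t then "documentation"
        else if pvAgeSpecific.contains t then "age_specific"
        else "content_specific" := by
  have h : pvIndex = PySem.Dict.mk (pvClinical.map (fun n => (n, "clinical_skills"))
      ++ (pvCommunication.map (fun n => (n, "communication"))
      ++ (pvDocumentation.map (fun n => (n, "documentation"))
      ++ (pvAgeSpecific.map (fun n => (n, "age_specific")) ++ [])))) := by decide
  rw [h, getD_map_append, getD_map_append, getD_map_append, getD_map_append]
  simp [PySem.Dict.getD, PySem.Dict.get?]

-- one step of A's loop, expressed through B's classifier
set_option maxRecDepth 4096 in
lemma pv_step (v1 v2 v3 v4 v5 v6 : List String) (t : String) :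
    (if PySem.Str.startswith t "detect_" then
        (pvD v1 v2 v3 v4 v5 v6).modify "error_detection" [] (· ++ [t])
      else if pvClinical.contains t then
        (pvD v1 v2 v3 v4 v5 v6).modify "clinical_skills" [] (· ++ [t])
      else if pvCommunication.contains t then
        (pvD v1 v2 v3 v4 v5 v6).modify "communication" [] (· ++ [t])
      else if pvDocumentation.contains t then
        (pvD v1 v2 v3 v4 v5 v6).modify "documentation" [] (· ++ [t])
      else if pvAgeSpecific.contains t then
        (pvD v1 v2 v3 v4 v5 v6).modify "age_specific" [] (· ++ [t])
      else
        (pvD v1 v2 v3 v4 v5 v6).modify "content_specific" [] (· ++ [t]))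
    = pvD (if pvClassify t == "clinical_skills" then v1 ++ [t] else v1)
          (if pvClassify t == "communication" then v2 ++ [t] else v2)
          (if pvClassify t == "documentation" then v3 ++ [t] else v3)
          (if pvClassify t == "age_specific" then v4 ++ [t] else v4)
          (if pvClassify t == "content_specific" then v5 ++ [t] else v5)
          (if pvClassify t == "error_detection" then v6 ++ [t] else v6) := by
  by_cases h1 : PySem.Str.startswith t "detect_" = true
  · have hc : pvClassify t = "error_detection" := by simp only [pvClassify, if_pos h1]
    simp only [h1, if_true, hc]; rfl
  · have hg := pvIndex_getD t
    by_cases h2 : pvClinical.contains t = true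
    · have hc : pvClassify t = "clinical_skills" := by
        simp only [pvClassify, if_neg h1, hg, if_pos h2]
      simp only [h1, Bool.false_eq_true, if_false, h2, if_true, hc]; rfl
    · by_cases h3 : pvCommunication.contains t = true
      · have hc : pvClassify t = "communication" := by
          simp only [pvClassify, if_neg h1, hg, if_neg h2, if_pos h3]
        simp only [h1, h2, Bool.false_eq_true, if_false, h3, if_true, hc]; rfl
      · by_cases h4 : pvDocumentation.contains t = true
        · have hc : pvClassify t = "documentation" := by
            simp only [pvClassify, if_neg h1, hg, if_neg h2, if_neg h3, if_pos h4]
          simp only [h1, h2, h3, Bool.false_eq_true, if_false, h4, if_true, hc]; rfl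
        · by_cases h5 : pvAgeSpecific.contains t = true
          · have hc : pvClassify t = "age_specific" := by
              simp only [pvClassify, if_neg h1, hg, if_neg h2, if_neg h3, if_neg h4, if_pos h5]
            simp only [h1, h2, h3, h4, Bool.false_eq_true, if_false, h5, if_true, hc]; rfl
          · have hc : pvClassify t = "content_specific" := by
              simp only [pvClassify, if_neg h1, hg, if_neg h2, if_neg h3, if_neg h4, if_neg h5]
            simp only [h1, h2, h3, h4, h5, Bool.false_eq_true, if_false, hc]; rfl

-- A's loop invariant: each bucket ends as its start contents plus the matching targets in order
lemma pv_loop (l : List String) (v1 v2 v3 v4 v5 v6 : List String) :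
    l.foldl (fun d target =>
      if PySem.Str.startswith target "detect_" then
        d.modify "error_detection" [] (· ++ [target])
      else if pvClinical.contains target then
        d.modify "clinical_skills" [] (· ++ [target])
      else if pvCommunication.contains target then
        d.modify "communication" [] (· ++ [target])
      else if pvDocumentation.contains target then
        d.modify "documentation" [] (· ++ [target])
      else if pvAgeSpecific.contains target then
        d.modify "age_specific" [] (· ++ [target])
      else
        d.modify "content_specific" [] (· ++ [target])) (pvD v1 v2 v3 v4 v5 v6)
    = pvD (v1 ++ l.filter (fun t => pvClassify t == "clinical_skills"))
          (v2 ++ l.filter (fun t => pvClassify t == "communication"))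
          (v3 ++ l.filter (fun t => pvClassify t == "documentation"))
          (v4 ++ l.filter (fun t => pvClassify t == "age_specific"))
          (v5 ++ l.filter (fun t => pvClassify t == "content_specific"))
          (v6 ++ l.filter (fun t => pvClassify t == "error_detection")) := by
  induction l generalizing v1 v2 v3 v4 v5 v6 with
  | nil => simp
  | cons t l ih =>
    simp only [List.foldl_cons, pv_step, ih, List.filter_cons]
    congr 1 <;> (split <;> simp)

-- ===== VERDICT (by name: the statement is the Claim_ definition above) =====
theorem categorize_targets_spec : Claim_equal_categorize_targets := by
  intro targets _
  unfold Spec_categorize_targets categorize_targets categorize_targets_alt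
  have h0 : pvCategories0 = pvD [] [] [] [] [] [] := rfl
  rw [h0, pv_loop]
  simp only [List.nil_append]
  -- B's loop appends (key, bucket) exactly when the bucket is non-empty
  have hstep : (fun (res : List (String × List String)) key =>
      let bucket := targets.filter (fun t => pvClassify t == key)
      if bucket.isEmpty then res else res ++ [(key, bucket)])
      = (fun res key =>
        if (!(targets.filter (fun t => pvClassify t == key)).isEmpty) = true then
          res ++ [(key, targets.filter (fun t => pvClassify t == key))] else res) := by
    funext res key
    cases h : (targets.filter (fun t => pvClassify t == key)).isEmpty <;> simp [h]
  rw [hstep, PySem.List.foldl_append_if]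
  -- A's filtered items are the same map-then-filter over the six keys
  have hA : (pvD (targets.filter (fun t => pvClassify t == "clinical_skills"))
      (targets.filter (fun t => pvClassify t == "communication"))
      (targets.filter (fun t => pvClassify t == "documentation"))
      (targets.filter (fun t => pvClassify t == "age_specific"))
      (targets.filter (fun t => pvClassify t == "content_specific"))
      (targets.filter (fun t => pvClassify t == "error_detection"))).items
      = pvKeys.map (fun key => (key, targets.filter (fun t => pvClassify t == key))) := rfl
  rw [hA, List.filter_map]
  rfl
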